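-- pv_equiv track=rewrite | github.com/Jiyong-Jeon/algorithm_practice | programmers/조이스틱(42860)/sol_42860.py | return_d
-- ===== SOURCE A (Python) =====
-- def return_d(tf_list, num_list):
--     temp = [ len(num_list) - i if i > (len(num_list)//2) else i for i in range(len(num_list))]
--     d = []
--     for i in range(len(num_list)):
--         d.append(temp.copy())
--         temp.insert(0, temp.pop())
--     for idx, t in enumerate(d):
--         if idx in tf_list or idx == 0:
--             for i, te in enumerate(t):
--                 if not i in tf_list:
--                     d[idx][i] = 0
--         else:
--             d[idx] = []
--     return d
-- ===== SOURCE B (Python) =====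
-- def return_d(tf_list, num_list):
--     n = len(num_list)
--     half = n // 2
--
--     def d0(k):
--         return n - k if k > half else k
--
--     return [
--         [d0((i - idx) % n) if i in tf_list else 0 for i in range(n)]
--         if idx in tf_list or idx == 0 else []
--         for idx in range(n)
--     ]
-- ===== Notes on version B (the rewrite author's own statement) =====
-- stated objective: simpler
-- what changed: Replaces the stateful incremental rotation (repeated temp.insert(0, temp.pop()) building cross-dependent rows, then an in-place filtering pass) with a single comprehension computing each entry independently from the closed form d0((i-idx) % n).
import Mathlib
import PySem

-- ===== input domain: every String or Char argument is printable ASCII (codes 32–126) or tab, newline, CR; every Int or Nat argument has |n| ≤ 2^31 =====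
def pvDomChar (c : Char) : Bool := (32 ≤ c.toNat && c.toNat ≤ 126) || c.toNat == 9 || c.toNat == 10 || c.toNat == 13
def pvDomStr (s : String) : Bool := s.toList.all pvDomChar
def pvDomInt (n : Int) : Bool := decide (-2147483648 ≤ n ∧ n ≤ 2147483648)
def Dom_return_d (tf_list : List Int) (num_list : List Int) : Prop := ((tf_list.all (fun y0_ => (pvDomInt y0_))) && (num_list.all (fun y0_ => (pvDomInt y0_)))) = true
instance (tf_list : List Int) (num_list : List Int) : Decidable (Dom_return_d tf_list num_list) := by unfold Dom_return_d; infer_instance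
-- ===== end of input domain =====

-- B computes every entry independently by the closed form d0((i-idx) % n), replacing A's
-- stateful incremental rotation and in-place filtering pass (objective: simpler).

-- ===== PORT A =====
def return_d (tf_list : List Int) (num_list : List Int) : List (List Int) :=
  let n : Int := (num_list.length : Int)
  let temp : List Int :=
    (PySem.List.pyRange 0 n 1).map (fun i => if i > PySem.Int.floordiv n 2 then n - i else i)
  -- for i in range(n): d.append(temp.copy()); temp.insert(0, temp.pop())
  let res := (PySem.List.pyRange 0 n 1).foldl
    (fun (st : List (List Int) × List Int) _i =>
      match PySem.List.pop? st.2 (-1) with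
      | some (x, rest) => (st.1 ++ [st.2], PySem.List.insert rest 0 x)
      | none => (st.1 ++ [st.2], st.2))   -- unreachable: temp is nonempty whenever the loop runs
    ([], temp)
  -- for idx, t in enumerate(d): filter in place / replace by []
  (PySem.List.enumerate res.1).map (fun p =>
    if tf_list.contains p.1 || p.1 == 0 then
      (PySem.List.enumerate p.2).map (fun q => if !(tf_list.contains q.1) then 0 else q.2)
    else [])

-- ===== PORT B =====
def return_d_alt (tf_list : List Int) (num_list : List Int) : List (List Int) :=
  let n : Int := (num_list.length : Int)
  let half : Int := PySem.Int.floordiv n 2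
  (PySem.List.pyRange 0 n 1).map (fun idx =>
    if tf_list.contains idx || idx == 0 then
      (PySem.List.pyRange 0 n 1).map (fun i =>
        if tf_list.contains i then
          (let k := PySem.Int.mod (i - idx) n; if k > half then n - k else k)
        else 0)
    else [])

-- ===== PRECONDITION & SPEC =====
def Spec_return_d (tf_list : List Int) (num_list : List Int) (out : List (List Int)) : Prop := out = return_d_alt tf_list num_list
instance (tf_list : List Int) (num_list : List Int) (out : List (List Int)) : Decidable (Spec_return_d tf_list num_list out) := by unfold Spec_return_d; infer_instance

-- ===== CLAIM (what is proved, stated in full; the proofs are below) =====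
def Claim_equal_return_d : Prop := ∀ (tf_list : List Int) (num_list : List Int), Dom_return_d tf_list num_list → Spec_return_d tf_list num_list (return_d tf_list num_list)

-- ===== LEMMAS AND PROOFS =====

/-- The right-rotation step `temp.insert(0, temp.pop())`. -/
def pvRot (t : List Int) : List Int :=
  match t.getLast? with
  | some x => x :: t.dropLast
  | none => []

theorem pvRot_eq (t : List Int) (h : t ≠ []) : pvRot t = t.getLast h :: t.dropLast := by
  simp [pvRot, List.getLast?_eq_some_getLast (h := h)]

theorem pvRot_length (t : List Int) : (pvRot t).length = t.length := by
  cases t with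
  | nil => rfl
  | cons a l => rw [pvRot_eq (a :: l) (by simp)]; simp

theorem pvRot_iter_length (j : ℕ) (t : List Int) : (pvRot^[j] t).length = t.length := by
  induction j with
  | zero => rfl
  | succ j ih => rw [Function.iterate_succ_apply', pvRot_length, ih]

theorem pvRot_ne_nil (t : List Int) (h : t ≠ []) : pvRot t ≠ [] := by
  intro hc
  have := pvRot_length t
  rw [hc] at this
  exact h (List.eq_nil_of_length_eq_zero this.symm)

theorem pvRot_getD (t : List Int) (h : t ≠ []) (i : ℕ) (hi : i < t.length) :
    (pvRot t).getD i 0 = t.getD ((((i : Int) - 1) % (t.length : Int)).toNat) 0 := by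
  have hn0 : 0 < t.length := List.length_pos_iff.mpr h
  rw [pvRot_eq t h]
  cases i with
  | zero =>
    have hmod : (((0 : ℕ) : Int) - 1) % (t.length : Int) = (t.length : Int) - 1 := by
      have h1 : (((0 : ℕ) : Int) - 1) = ((t.length : Int) - 1) + (-1) * t.length := by
        push_cast; ring
      rw [h1, show ((t.length : Int) - 1) + (-1) * t.length
            = ((t.length : Int) - 1) + (t.length : Int) * (-1) by ring,
        Int.add_mul_emod_self_left]
      exact Int.emod_eq_of_lt (by omega) (by omega)
    rw [List.getD_cons_zero, hmod, List.getLast_eq_getElem, List.getD_eq_getElem?_getD,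
      List.getElem?_eq_getElem (by omega)]
    simp only [Option.getD_some]
    congr 1
    omega
  | succ i' =>
    have hmod : (((i' + 1 : ℕ) : Int) - 1) % (t.length : Int) = (i' : Int) := by
      have : (((i' + 1 : ℕ) : Int) - 1) = (i' : Int) := by push_cast; ring
      rw [this]
      exact Int.emod_eq_of_lt (by positivity) (by omega)
    rw [List.getD_cons_succ, hmod]
    have h2 : i' < t.length - 1 := by omega
    rw [List.getD_eq_getElem?_getD, List.getD_eq_getElem?_getD, List.getElem?_dropLast]
    simp only [h2, if_pos, Int.toNat_natCast]

/-- Element formula for the iterated rotation. -/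
theorem pvRot_iter_getD (j : ℕ) (t : List Int) (h : t ≠ []) (i : ℕ) (hi : i < t.length) :
    (pvRot^[j] t).getD i 0 = t.getD ((((i : Int) - j) % (t.length : Int)).toNat) 0 := by
  have hn0 : 0 < t.length := List.length_pos_iff.mpr h
  induction j generalizing i with
  | zero =>
    simp only [Function.iterate_zero, id]
    congr 1
    have : ((i : Int) - (0 : ℕ)) % (t.length : Int) = (i : Int) := by
      rw [Nat.cast_zero, sub_zero]
      exact Int.emod_eq_of_lt (by positivity) (by exact_mod_cast hi)
    omega
  | succ j ih =>
    rw [Function.iterate_succ_apply']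
    have hlen : (pvRot^[j] t).length = t.length := pvRot_iter_length j t
    have hne : pvRot^[j] t ≠ [] := by
      intro hc; rw [hc] at hlen; simp at hlen; omega
    rw [show (pvRot (pvRot^[j] t)).getD i 0
        = (pvRot^[j] t).getD ((((i : Int) - 1) % ((pvRot^[j] t).length : Int)).toNat) 0 from
      pvRot_getD _ hne i (by omega)]
    rw [hlen]
    set k : ℕ := (((i : Int) - 1) % (t.length : Int)).toNat with hk
    have hknn : 0 ≤ ((i : Int) - 1) % (t.length : Int) :=
      Int.emod_nonneg _ (by omega)
    have hklt : ((i : Int) - 1) % (t.length : Int) < t.length :=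
      Int.emod_lt_of_pos _ (by exact_mod_cast hn0)
    have hkcast : (k : Int) = ((i : Int) - 1) % (t.length : Int) := by omega
    rw [ih k (by omega)]
    congr 2
    have key : ∀ a b m : Int, (a % m - b) % m = (a - b) % m := by
      intro a b m
      conv_lhs => rw [Int.sub_emod]
      conv_rhs => rw [Int.sub_emod]
      rw [Int.emod_emod_of_dvd _ dvd_rfl]
    rw [hkcast, key]
    congr 1
    push_cast
    ring

/-- The fold producing `d` collects the iterated rotations. -/
theorem pvFold_collect (l : List Int) (acc : List (List Int)) (t : List Int) (hne : t ≠ []) :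
    (l.foldl
      (fun (st : List (List Int) × List Int) _i =>
        match PySem.List.pop? st.2 (-1) with
        | some (x, rest) => (st.1 ++ [st.2], PySem.List.insert rest 0 x)
        | none => (st.1 ++ [st.2], st.2)) (acc, t)).1
    = acc ++ (List.range l.length).map (fun j => pvRot^[j] t) := by
  induction l generalizing acc t with
  | nil => simp
  | cons a l ih =>
    have hpop : PySem.List.pop? t (-1) = some (t.getLast hne, t.dropLast) := by
      conv_lhs => rw [← List.dropLast_append_getLast hne]
      exact PySem.List.pop?_last ..
    have hstep : (match PySem.List.pop? ((acc, t) : List (List Int) × List Int).2 (-1) with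
        | some (x, rest) => ((acc, t).1 ++ [(acc, t).2], PySem.List.insert rest 0 x)
        | none => ((acc, t).1 ++ [(acc, t).2], (acc, t).2))
        = ((acc ++ [t], pvRot t) : List (List Int) × List Int) := by
      show (match PySem.List.pop? t (-1) with
        | some (x, rest) => (acc ++ [t], PySem.List.insert rest 0 x)
        | none => (acc ++ [t], t)) = (acc ++ [t], pvRot t)
      rw [hpop]
      show (acc ++ [t], PySem.List.insert t.dropLast 0 (t.getLast hne)) = (acc ++ [t], pvRot t)
      rw [PySem.List.insert_zero, pvRot_eq t hne]
    rw [List.foldl_cons, hstep, ih _ _ (pvRot_ne_nil t hne)]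
    rw [List.length_cons, List.range_succ_eq_map]
    simp [Function.iterate_succ_apply, List.map_map, Function.comp_def, List.append_assoc]

set_option maxRecDepth 8000 in
set_option maxHeartbeats 1000000 in
theorem return_d_eq (tf_list : List Int) (num_list : List Int) :
    return_d tf_list num_list = return_d_alt tf_list num_list := by
  simp only [return_d, return_d_alt]
  by_cases h0 : num_list.length = 0
  · rw [PySem.List.pyRange_one_eq_nil (by omega)]
    simp [PySem.List.enumerate_nil]
  · set N : Int := (num_list.length : Int) with hNdef
    set f : Int → Int := fun i => if i > PySem.Int.floordiv N 2 then N - i else i with hfdef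
    set temp : List Int := (PySem.List.pyRange 0 N 1).map f with htempdef
    have hN : (0:Int) < N := by rw [hNdef]; exact_mod_cast Nat.pos_of_ne_zero h0
    have htlen : temp.length = num_list.length := by
      rw [htempdef]
      simp [PySem.List.length_pyRange_one, hNdef]
    have htne : temp ≠ [] := by
      intro hc; rw [hc] at htlen; simp at htlen; omega
    rw [pvFold_collect _ [] _ htne, List.nil_append]
    apply List.ext_getElem
    · simp [PySem.List.length_enumerate, PySem.List.length_pyRange_one]
    · intro idx hL hR
      rw [List.getElem_map, List.getElem_map, PySem.List.getElem_enumerate,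
        List.getElem_map, List.getElem_range, PySem.List.getElem_pyRange_one]
      simp only [zero_add]
      by_cases hc : (tf_list.contains (idx : Int) || ((idx : Int) == 0)) = true
      · rw [if_pos hc, if_pos hc]
        apply List.ext_getElem
        · simp [PySem.List.length_enumerate, pvRot_iter_length, PySem.List.length_pyRange_one,
            htlen, hNdef]
        · intro i hi1 hi2
          rw [List.getElem_map, PySem.List.getElem_enumerate, List.getElem_map,
            PySem.List.getElem_pyRange_one]
          simp only [zero_add]
          by_cases hm : tf_list.contains ((i : ℕ) : Int) = true
          · simp only [hm, Bool.not_true, Bool.false_eq_true, if_false, if_true]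
            have hin : i < num_list.length := by
              simpa [PySem.List.length_pyRange_one, hNdef] using hi2
            have hitemp : i < temp.length := by rw [htlen]; exact hin
            rw [List.getD_eq_getElem _ 0 (by rw [pvRot_iter_length, htlen]; exact hin) |>.symm,
              pvRot_iter_getD idx _ htne i hitemp, htlen, ← hNdef]
            have hK0 : 0 ≤ ((i : Int) - (idx : Int)) % N := Int.emod_nonneg _ (by omega)
            have hKlt : ((i : Int) - (idx : Int)) % N < N := Int.emod_lt_of_pos _ hN
            rw [htempdef, List.getD_eq_getElem?_getD, hNdef,
              PySem.List.getElem?_map_pyRange_zero f num_list.length _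
                (by rw [hNdef] at hK0 hKlt; omega),
              Option.getD_some, Int.toNat_of_nonneg (by rw [← hNdef]; exact hK0),
              PySem.Int.mod_eq_emod_of_pos hN]
          · simp only [hm, Bool.not_false, if_true, Bool.false_eq_true, if_false]
      · rw [if_neg hc, if_neg hc]

-- ===== VERDICT (by name: the statement is the Claim_ definition above) =====
theorem return_d_spec : Claim_equal_return_d := by
  intro tf num _
  unfold Spec_return_d
  exact return_d_eq tf num
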